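-- pv_equiv track=rewrite | github.com/bmuralid/Pure-Fortran | xc2f.py | remove_redundant_final_stop
-- ===== SOURCE A (Python) =====
-- from typing import Dict, List, Optional, Set, Tuple
--
-- def remove_redundant_final_stop(lines: List[str]) -> List[str]:
--     """Drop `stop` when it appears immediately before `end program`."""
--     out = list(lines)
--     i = 0
--     while i < len(out):
--         if out[i].strip().lower().startswith("end program"):
--             j = i - 1
--             while j >= 0 and not out[j].strip():
--                 j -= 1
--             if j >= 0 and out[j].strip().lower() == "stop":
--                 del out[j]
--                 i -= 1
--         i += 1
--     return out
-- ===== SOURCE B (Python) =====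
-- from typing import List
--
-- def remove_redundant_final_stop(lines: List[str]) -> List[str]:
--     """Drop `stop` when it appears immediately before `end program`."""
--     def followed_by_end_program(i: int) -> bool:
--         for line in lines[i + 1:]:
--             s = line.strip()
--             if s:
--                 return s.lower().startswith("end program")
--         return False
--     return [line for i, line in enumerate(lines)
--             if not (line.strip().lower() == "stop" and followed_by_end_program(i))]
-- ===== Notes on version B (the rewrite author's own statement) =====
-- stated objective: alternative
-- what changed: A mutates a copy in place, deleting each redundant 'stop' while re-adjusting the loop index; B never mutates: it filters the original list, keeping each line unless it is a 'stop' whose next non-blank line starts with 'end program' (a forward-looking per-line predicate instead of backward scans with deletion).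
import Mathlib
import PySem

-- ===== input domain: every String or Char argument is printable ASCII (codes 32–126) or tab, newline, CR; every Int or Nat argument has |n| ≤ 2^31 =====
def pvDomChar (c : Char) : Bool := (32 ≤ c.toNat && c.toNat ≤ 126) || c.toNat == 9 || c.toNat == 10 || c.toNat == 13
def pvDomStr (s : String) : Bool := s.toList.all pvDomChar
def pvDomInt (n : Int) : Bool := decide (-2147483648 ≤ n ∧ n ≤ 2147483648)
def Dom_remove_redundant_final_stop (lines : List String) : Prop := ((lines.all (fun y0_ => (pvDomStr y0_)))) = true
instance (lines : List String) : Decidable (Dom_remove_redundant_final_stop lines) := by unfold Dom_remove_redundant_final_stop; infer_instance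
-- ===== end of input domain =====

-- B replaces A's in-place deletion loop (with index re-adjustment) by a pure filter of the
-- original list with a forward-looking per-line predicate; same result, no mutation (objective: alternative).

-- ===== PORT A =====
-- shared spelling of Python's  l.strip().lower()  and  l.strip().lower().startswith("end program")
def pvSL (l : String) : String := PySem.Str.lower (PySem.Str.strip l)
def pvIsEP (l : String) : Bool := PySem.Str.startswith (pvSL l) "end program"

-- inner while:  j = i-1; while j >= 0 and not out[j].strip(): j -= 1
def pvPnb (out : List String) (j : Int) : Int :=
  if 0 ≤ j ∧ PySem.Str.strip (out.getD j.toNat "") = "" then pvPnb out (j - 1) else j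
termination_by (j + 1).toNat
decreasing_by omega

theorem pvPnb_le (out : List String) (j : Int) : pvPnb out j ≤ j := by
  unfold pvPnb
  split
  · have := pvPnb_le out (j - 1); omega
  · omega
termination_by (j + 1).toNat
decreasing_by omega

-- outer while with in-place del and index re-adjustment (Python's local j = pvPnb out (i-1), written inline)
def pvLoopA (out : List String) (i : Int) : List String :=
  if h : i < (out.length : Int) then
    if pvIsEP (out.getD i.toNat "") then
      if hj : 0 ≤ pvPnb out (i - 1) ∧ pvSL (out.getD (pvPnb out (i - 1)).toNat "") = "stop" then
        pvLoopA (out.eraseIdx (pvPnb out (i - 1)).toNat) (i - 1 + 1)     -- del out[j]; i -= 1; i += 1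
      else pvLoopA out (i + 1)
    else pvLoopA out (i + 1)
  else out
termination_by ((out.length : Int) - i).toNat
decreasing_by
  · have hle := pvPnb_le out (i - 1)
    have hlt : (pvPnb out (i - 1)).toNat < out.length := by omega
    rw [List.length_eraseIdx_of_lt hlt]
    omega
  · omega
  · omega

def remove_redundant_final_stop (lines : List String) : List String := pvLoopA lines 0

-- ===== PORT B =====
-- for line in lines[i+1:]: s = line.strip(); if s: return s.lower().startswith("end program"); return False
def pvFEP : List String → Bool
  | [] => false
  | l :: rest => if PySem.Str.strip l ≠ "" then pvIsEP l else pvFEP rest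

def remove_redundant_final_stop_alt (lines : List String) : List String :=
  ((PySem.List.enumerate lines 0).filter
    (fun p => !(pvSL p.2 == "stop" && pvFEP (PySem.List.slice lines (some (p.1 + 1)) none)))).map
    (fun p => p.2)

-- ===== PRECONDITION & SPEC =====
def Spec_remove_redundant_final_stop (lines : List String) (out : List String) : Prop := out = remove_redundant_final_stop_alt lines
instance (lines : List String) (out : List String) : Decidable (Spec_remove_redundant_final_stop lines out) := by unfold Spec_remove_redundant_final_stop; infer_instance

-- ===== CLAIM (what is proved, stated in full; the proofs are below) =====
def Claim_equal_remove_redundant_final_stop : Prop := ∀ (lines : List String), Dom_remove_redundant_final_stop lines → Spec_remove_redundant_final_stop lines (remove_redundant_final_stop lines)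

-- ===== LEMMAS AND PROOFS =====

-- Common characterisation: pvGo i pos xs keeps each line of xs (whose absolute position is pos, pos+1, …)
-- unless it strips to "stop" and the next non-blank line is an "end program" at absolute position ≥ i.
-- A's loop state (out, i) equals pvGo i 0 out; B equals pvGo 0 0 lines.
def pvAC (i : Int) (pos : Int) : List String → Bool
  | [] => false
  | l :: rest => if PySem.Str.strip l ≠ "" then (pvIsEP l && decide (i ≤ pos)) else pvAC i (pos + 1) rest

def pvGo (i : Int) (pos : Int) : List String → List String
  | [] => []
  | l :: rest =>
      if pvSL l == "stop" && pvAC i (pos + 1) rest then pvGo i (pos + 1) rest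
      else l :: pvGo i (pos + 1) rest

theorem pvSL_blank {l : String} (h : PySem.Str.strip l = "") : pvSL l = "" := by
  simp [pvSL, h]; decide

theorem pvSL_stop_nonblank {l : String} (h : pvSL l = "stop") : PySem.Str.strip l ≠ "" := by
  intro hb; rw [pvSL_blank hb] at h; exact absurd h (by decide)

theorem pvIsEP_of_stop {l : String} (h : pvSL l = "stop") : pvIsEP l = false := by
  simp [pvIsEP, h]; decide

theorem pvSL_ne_stop_of_EP {l : String} (h : pvIsEP l = true) : (pvSL l == "stop") = false := by
  by_cases hv : pvSL l = "stop"
  · rw [pvIsEP_of_stop hv] at h; exact absurd h (by simp)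
  · exact beq_eq_false_iff_ne.mpr hv

theorem pvIsEP_nonblank {l : String} (h : pvIsEP l = true) : PySem.Str.strip l ≠ "" := by
  intro hb
  have : pvIsEP l = false := by simp [pvIsEP, pvSL_blank hb]; decide
  rw [this] at h; exact absurd h (by simp)

theorem pvAC_ge (xs : List String) (i p p' : Int) (hp : i ≤ p) (hp' : i ≤ p') :
    pvAC i p xs = pvAC i p' xs := by
  induction xs generalizing p p' with
  | nil => rfl
  | cons l rest ih =>
      simp only [pvAC]
      split
      · simp [hp, hp']
      · exact ih (p + 1) (p' + 1) (by omega) (by omega)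

theorem pvGo_ge (xs : List String) (i p p' : Int) (hp : i ≤ p) (hp' : i ≤ p') :
    pvGo i p xs = pvGo i p' xs := by
  induction xs generalizing p p' with
  | nil => rfl
  | cons l rest ih =>
      simp only [pvGo]
      rw [pvAC_ge rest i (p + 1) (p' + 1) (by omega) (by omega),
          ih (p + 1) (p' + 1) (by omega) (by omega)]

theorem pvAC_small (xs : List String) (i p : Int) (h : p + xs.length ≤ i) :
    pvAC i p xs = false := by
  induction xs generalizing p with
  | nil => rfl
  | cons l rest ih =>
      simp only [List.length_cons] at h
      simp only [pvAC]
      split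
      · have : ¬ i ≤ p := by push_cast at h ⊢; omega
        simp [this]
      · exact ih (p + 1) (by push_cast at h ⊢; omega)

theorem pvGo_all (xs : List String) (i p : Int) (h : p + xs.length ≤ i) :
    pvGo i p xs = xs := by
  induction xs generalizing p with
  | nil => rfl
  | cons l rest ih =>
      simp only [List.length_cons] at h
      rw [pvGo, pvAC_small rest i (p + 1) (by push_cast at h ⊢; omega)]
      simp [ih (p + 1) (by push_cast at h ⊢; omega)]

theorem pvAC_firstNB (xs : List String) (i p : Int) (d : Nat) (hd : d < xs.length)
    (hblank : ∀ m : Nat, m < d → PySem.Str.strip (xs.getD m "") = "")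
    (hnb : PySem.Str.strip (xs.getD d "") ≠ "") :
    pvAC i p xs = (pvIsEP (xs.getD d "") && decide (i ≤ p + d)) := by
  induction xs generalizing p d with
  | nil => simp at hd
  | cons l rest ih =>
      cases d with
      | zero =>
          simp only [List.getD_cons_zero] at hnb ⊢
          simp [pvAC, hnb]
      | succ k =>
          have hb0 : PySem.Str.strip l = "" := by
            have := hblank 0 (Nat.succ_pos k); simpa using this
          have hk : k < rest.length := by
            simp only [List.length_cons] at hd; omega
          have hbl : ∀ m : Nat, m < k → PySem.Str.strip (rest.getD m "") = "" := by
            intro m hm; have := hblank (m + 1) (by omega); simpa using this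
          simp only [List.getD_cons_succ] at hnb ⊢
          simp only [pvAC, hb0, ne_eq, not_true_eq_false, if_false]
          rw [ih (p + 1) k hk hbl hnb]
          have : p + 1 + (k : Int) = p + ((k : Nat) + 1 : Nat) := by push_cast; omega
          rw [this]

theorem pvGo_blankPrefix (xs : List String) (i p : Int) (d : Nat)
    (hblank : ∀ m : Nat, m < d → PySem.Str.strip (xs.getD m "") = "") :
    pvGo i p xs = xs.take d ++ pvGo i (p + d) (xs.drop d) := by
  induction xs generalizing p d with
  | nil => simp [pvGo]
  | cons l rest ih =>
      cases d with
      | zero => simp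
      | succ k =>
          have hb0 : PySem.Str.strip l = "" := by
            have := hblank 0 (Nat.succ_pos k); simpa using this
          have hsl : (pvSL l == "stop") = false := by
            rw [pvSL_blank hb0]; decide
          have hbl : ∀ m : Nat, m < k → PySem.Str.strip (rest.getD m "") = "" := by
            intro m hm; have := hblank (m + 1) (by omega); simpa using this
          have harith : p + 1 + (k : Int) = p + ((k : Nat) + 1 : Nat) := by push_cast; omega
          simp only [pvGo, hsl, Bool.false_and, List.take_succ_cons, List.drop_succ_cons,
            List.cons_append]
          rw [if_neg (by simp), ih (p + 1) k hbl, harith]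

theorem pvAC_app (ys : List String) (L R : List String) (i p : Int)
    (h : pvAC i (p + ys.length) L = pvAC i (p + ys.length) R) :
    pvAC i p (ys ++ L) = pvAC i p (ys ++ R) := by
  induction ys generalizing p with
  | nil => simpa using h
  | cons y ys ih =>
      have hlen : p + ((y :: ys).length : Int) = (p + 1) + ys.length := by
        simp only [List.length_cons]; push_cast; omega
      rw [hlen] at h
      simp only [List.cons_append, pvAC]
      split
      · rfl
      · exact ih (p + 1) h

theorem pvGo_app (ys : List String) (L R : List String) (i p : Int)
    (hAC : pvAC i (p + ys.length) L = pvAC i (p + ys.length) R)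
    (hGo : pvGo i (p + ys.length) L = pvGo i (p + ys.length) R) :
    pvGo i p (ys ++ L) = pvGo i p (ys ++ R) := by
  induction ys generalizing p with
  | nil => simpa using hGo
  | cons y ys ih =>
      have hlen : p + ((y :: ys).length : Int) = (p + 1) + ys.length := by
        simp only [List.length_cons]; push_cast; omega
      rw [hlen] at hAC hGo
      simp only [List.cons_append, pvGo]
      rw [pvAC_app ys L R i (p + 1) hAC, ih (p + 1) hAC hGo]

theorem pvAC_succ (xs : List String) (i p : Int)
    (h : ∀ k : Nat, k < xs.length → p + k = i → pvIsEP (xs.getD k "") = true →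
          (∀ m : Nat, m < k → PySem.Str.strip (xs.getD m "") = "") → False) :
    pvAC i p xs = pvAC (i + 1) p xs := by
  induction xs generalizing p with
  | nil => rfl
  | cons l rest ih =>
      simp only [pvAC]
      split
      · rename_i hnb
        by_cases hEP : pvIsEP l = true
        · by_cases hpi : p = i
          · exact absurd (h 0 (by simp) (by omega) (by simpa using hEP)
              (fun m hm => absurd hm (by omega))) not_false
          · have : (decide (i ≤ p)) = (decide (i + 1 ≤ p)) := by
              by_cases hle : i ≤ p
              · simp [hle, show i + 1 ≤ p by omega]
              · simp [hle, show ¬ i + 1 ≤ p by omega]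
            rw [this]
        · simp only [Bool.not_eq_true] at hEP; simp [hEP]
      · rename_i hb
        rw [not_not] at hb
        exact ih (p + 1) (fun k hk hik hEP hbl => by
          refine h (k + 1) (by simpa using hk) (by push_cast at hik ⊢; omega)
            (by simpa using hEP) (fun m hm => ?_)
          cases m with
          | zero => simpa using hb
          | succ m' => have := hbl m' (by omega); simpa using this)

theorem pvGo_succ (xs : List String) (i p : Int)
    (h : ∀ k : Nat, k < xs.length → p + k = i → pvIsEP (xs.getD k "") = true →
          ∀ k' : Nat, k' < k → pvSL (xs.getD k' "") = "stop" →
            ∃ m : Nat, k' < m ∧ m < k ∧ PySem.Str.strip (xs.getD m "") ≠ "") :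
    pvGo i p xs = pvGo (i + 1) p xs := by
  induction xs generalizing p with
  | nil => rfl
  | cons l rest ih =>
      have hrest : ∀ k : Nat, k < rest.length → (p + 1) + k = i → pvIsEP (rest.getD k "") = true →
          ∀ k' : Nat, k' < k → pvSL (rest.getD k' "") = "stop" →
            ∃ m : Nat, k' < m ∧ m < k ∧ PySem.Str.strip (rest.getD m "") ≠ "" := by
        intro k hk hik hEP k' hk' hstop
        obtain ⟨m, hm1, hm2, hm3⟩ := h (k + 1) (by simpa using hk) (by push_cast at hik ⊢; omega)
          (by simpa using hEP) (k' + 1) (by omega) (by simpa using hstop)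
        cases m with
        | zero => omega
        | succ m' => exact ⟨m', by omega, by omega, by simpa using hm3⟩
      simp only [pvGo]
      by_cases hsl : (pvSL l == "stop") = true
      · have hslv : pvSL l = "stop" := eq_of_beq hsl
        have hAC : pvAC i (p + 1) rest = pvAC (i + 1) (p + 1) rest := by
          apply pvAC_succ
          intro k hk hik hEP hbl
          obtain ⟨m, hm1, hm2, hm3⟩ := h (k + 1) (by simpa using hk)
            (by push_cast at hik ⊢; omega) (by simpa using hEP) 0 (by omega)
            (by simpa using hslv)
          cases m with
          | zero => omega
          | succ m' => exact hm3 (by have := hbl m' (by omega); simpa using this)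
        rw [hsl, hAC, ih (p + 1) hrest]
      · simp only [Bool.not_eq_true] at hsl
        rw [hsl]
        simp only [Bool.false_and]
        rw [if_neg (by simp), if_neg (by simp), ih (p + 1) hrest]

-- characterisation of the inner while loop
theorem pvPnb_blank (out : List String) (j m : Int) (h1 : pvPnb out j < m) (h2 : m ≤ j) :
    PySem.Str.strip (out.getD m.toNat "") = "" := by
  rw [pvPnb] at h1
  split at h1
  · rename_i hc
    by_cases hm : m ≤ j - 1
    · exact pvPnb_blank out (j - 1) m h1 hm
    · have : m = j := by omega
      rw [this]; exact hc.2
  · omega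
termination_by (j + 1).toNat
decreasing_by omega

theorem pvPnb_eq (out : List String) (j k : Int) (hk0 : 0 ≤ k) (hkj : k ≤ j)
    (hnb : PySem.Str.strip (out.getD k.toNat "") ≠ "")
    (hbl : ∀ m : Int, k < m → m ≤ j → PySem.Str.strip (out.getD m.toNat "") = "") :
    pvPnb out j = k := by
  rw [pvPnb]
  split
  · rename_i hc
    have hkj' : k ≤ j - 1 := by
      by_contra hlt
      have : k = j := by omega
      rw [this] at hnb; exact hnb hc.2
    exact pvPnb_eq out (j - 1) k hk0 hkj' hnb (fun m hm1 hm2 => hbl m hm1 (by omega))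
  · rename_i hc
    rw [not_and_or] at hc
    by_contra hne
    have hkj' : k < j := by omega
    rcases hc with hc | hc
    · omega
    · exact hc (hbl j hkj' le_rfl)
termination_by (j + 1).toNat
decreasing_by omega

-- getD through drop
theorem pvGetD_drop (out : List String) (n m : Nat) :
    (out.drop n).getD m "" = out.getD (n + m) "" := by
  simp [List.getD_eq_getElem?_getD, List.getElem?_drop]

-- MAIN INVARIANT: A's loop state (out, i) computes pvGo i 0 out
set_option maxHeartbeats 1000000 in
theorem pvMain (out : List String) (i : Int) (hi : 0 ≤ i) : pvLoopA out i = pvGo i 0 out := by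
  fun_induction pvLoopA out i with
  | case1 out i h hEP hj ih =>
      -- delete branch
      obtain ⟨hj0, hjstop⟩ := hj
      have hle : pvPnb out (i - 1) ≤ i - 1 := pvPnb_le out (i - 1)
      have hbl' : ∀ m : Int, pvPnb out (i - 1) < m → m ≤ i - 1 →
          PySem.Str.strip (out.getD m.toNat "") = "" :=
        fun m h1 h2 => pvPnb_blank out (i - 1) m h1 h2
      generalize hjdef : pvPnb out (i - 1) = j at hj0 hjstop hle hbl' ih ⊢
      have hi' : i - 1 + 1 = i := by omega
      rw [hi'] at ih ⊢
      rw [ih hi]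
      clear ih
      have hjlt : j.toNat < out.length := by omega
      obtain ⟨D, hDdef⟩ : ∃ D, out.drop (j.toNat + 1) = D := ⟨_, rfl⟩
      obtain ⟨d, hddef⟩ : ∃ d : Nat, (i - j - 1).toNat = d := ⟨_, rfl⟩
      have hsplit : out = out.take j.toNat ++ out.getD j.toNat "" :: D := by
        rw [List.getD_eq_getElem _ _ hjlt, ← hDdef, ← List.drop_eq_getElem_cons hjlt,
          List.take_append_drop]
      have herase : out.eraseIdx j.toNat = out.take j.toNat ++ D := by
        rw [← hDdef]; exact List.eraseIdx_eq_take_drop_succ out j.toNat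
      have htklen : (out.take j.toNat).length = j.toNat := by
        simp [List.length_take]; omega
      have hDget : ∀ m : Nat, D.getD m "" = out.getD (j.toNat + 1 + m) "" := by
        intro m; rw [← hDdef, pvGetD_drop]
      have hDblank : ∀ m : Nat, m < d → PySem.Str.strip (D.getD m "") = "" := by
        intro m hm
        rw [hDget m]
        have := hbl' ((j.toNat : Int) + 1 + m) (by omega) (by omega)
        have harg : ((j.toNat : Int) + 1 + m).toNat = j.toNat + 1 + m := by omega
        rwa [harg] at this
      have hDlen : d < D.length := by
        rw [← hDdef, List.length_drop]; omega
      have hDd : D.getD d "" = out.getD i.toNat "" := by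
        rw [hDget d]
        have : j.toNat + 1 + d = i.toNat := by omega
        rw [this]
      have hDnb : PySem.Str.strip (D.getD d "") ≠ "" := by
        rw [hDd]; exact pvIsEP_nonblank hEP
      have key : pvGo i 0 out = pvGo i 0 (out.eraseIdx j.toNat) := by
        rw [herase]
        conv_lhs => rw [hsplit]
        apply pvGo_app
        · -- pvAC at the junction
          rw [htklen]
          have hL : pvAC i (0 + (j.toNat : Int)) (out.getD j.toNat "" :: D) = false := by
            simp only [pvAC, pvSL_stop_nonblank hjstop, ne_eq, not_false_eq_true, if_true,
              pvIsEP_of_stop hjstop, Bool.false_and]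
          have hR : pvAC i (0 + (j.toNat : Int)) D = false := by
            rw [pvAC_firstNB D i _ d hDlen hDblank hDnb, hDd]
            have hd : ¬ (i ≤ 0 + (j.toNat : Int) + d) := by omega
            rw [decide_eq_false hd, Bool.and_false]
          rw [hL, hR]
        · -- pvGo at the junction
          rw [htklen]
          have hcond : pvAC i (0 + (j.toNat : Int) + 1) D = true := by
            rw [pvAC_firstNB D i _ d hDlen hDblank hDnb, hDd]
            have hd : i ≤ 0 + (j.toNat : Int) + 1 + d := by omega
            rw [hEP, Bool.true_and, decide_eq_true hd]
          have hstep : pvGo i (0 + (j.toNat : Int)) (out.getD j.toNat "" :: D)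
              = pvGo i (0 + (j.toNat : Int) + 1) D := by
            simp only [pvGo, hcond, Bool.and_true]
            rw [if_pos (by rw [hjstop]; decide)]
          rw [hstep]
          -- both sides: blank prefix of D, then the end-program line, then pvGo_ge
          have hDsplit : D.drop d = out.getD i.toNat "" :: D.drop (d + 1) := by
            rw [List.drop_eq_getElem_cons hDlen, ← hDd, List.getD_eq_getElem _ _ hDlen]
          have hne : (pvSL (out.getD i.toNat "") == "stop") = false := pvSL_ne_stop_of_EP hEP
          have hgo2 : pvGo i (0 + (j.toNat : Int) + 1 + d) (D.drop d)
              = pvGo i (0 + (j.toNat : Int) + d) (D.drop d) := by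
            rw [hDsplit]
            simp only [pvGo, hne, Bool.false_and]
            rw [if_neg (by simp), if_neg (by simp),
              pvGo_ge (D.drop (d + 1)) i (0 + (j.toNat : Int) + 1 + d + 1)
                (0 + (j.toNat : Int) + d + 1) (by omega) (by omega)]
          rw [pvGo_blankPrefix D i (0 + (j.toNat : Int) + 1) d hDblank,
              pvGo_blankPrefix D i (0 + (j.toNat : Int)) d hDblank, hgo2]
      rw [← key]
  | case2 out i h hEP hj ih =>
      -- end-program line, but no stop to delete
      have hle : pvPnb out (i - 1) ≤ i - 1 := pvPnb_le out (i - 1)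
      rw [ih (by omega)]
      symm
      apply pvGo_succ
      intro k hk hik hEPk k' hk' hstop
      by_contra hno
      rw [not_exists] at hno
      have hno' : ∀ m : Nat, k' < m → m < k → PySem.Str.strip (out.getD m "") = "" := by
        intro m hm1 hm2
        have := hno m
        rw [not_and_or, not_and_or] at this
        rcases this with hc | hc | hc
        · omega
        · omega
        · rwa [not_not] at hc
      have hkval : (k : Int) = i := by omega
      have hpnb : pvPnb out (i - 1) = (k' : Int) := by
        apply pvPnb_eq
        · omega
        · omega
        · have : ((k' : Int)).toNat = k' := by omega
          rw [this]; exact pvSL_stop_nonblank hstop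
        · intro m hm1 hm2
          have hmn : m.toNat < k := by omega
          have := hno' m.toNat (by omega) hmn
          simpa using this
      apply hj
      rw [hpnb]
      refine ⟨by omega, ?_⟩
      have : ((k' : Int)).toNat = k' := by omega
      rw [this]; exact hstop
  | case3 out i h hEP ih =>
      -- not an end-program line
      simp only [Bool.not_eq_true] at hEP
      rw [ih (by omega)]
      symm
      apply pvGo_succ
      intro k hk hik hEPk k' hk' hstop
      exfalso
      have hkval : (k : Int) = i := by omega
      have hkn : k = i.toNat := by omega
      rw [hkn, hEP] at hEPk
      exact absurd hEPk (by simp)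
  | case4 out i h =>
      symm
      exact pvGo_all out i 0 (by omega)

-- B computes pvGo 0 0
theorem pvFEP_eq_AC (xs : List String) (p : Int) (hp : 0 ≤ p) : pvFEP xs = pvAC 0 p xs := by
  induction xs generalizing p with
  | nil => rfl
  | cons l rest ih =>
      simp only [pvFEP, pvAC]
      split
      · simp [hp]
      · exact ih (p + 1) (by omega)

theorem pvAlt_aux (lines : List String) : ∀ (xs : List String) (k : Nat), lines.drop k = xs →
    ((PySem.List.enumerate xs (k : Int)).filter
      (fun p => !(pvSL p.2 == "stop" && pvFEP (PySem.List.slice lines (some (p.1 + 1)) none)))).map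
      (fun p => p.2) = pvGo 0 (k : Int) xs := by
  intro xs
  induction xs with
  | nil => intro k _; simp [PySem.List.enumerate_nil, pvGo]
  | cons l rest ih =>
      intro k hdrop
      have hdrop' : lines.drop (k + 1) = rest := by
        have h1 : lines.drop (k + 1) = (lines.drop k).drop 1 := by
          rw [List.drop_drop]
        rw [h1, hdrop, List.drop_one, List.tail_cons]
      have hslice : PySem.List.slice lines (some ((k : Int) + 1)) none = rest := by
        have hcast : ((k : Int) + 1) = ((k + 1 : Nat) : Int) := by push_cast; omega
        rw [hcast, PySem.List.slice_from_natCast, hdrop']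
      have hih := ih (k + 1) hdrop'
      rw [show ((k + 1 : Nat) : Int) = (k : Int) + 1 by push_cast; omega] at hih
      have hFEP : pvFEP rest = pvAC 0 ((k : Int) + 1) rest := pvFEP_eq_AC rest _ (by omega)
      rw [PySem.List.enumerate_cons]
      simp only [List.filter_cons, hslice, hFEP]
      by_cases hc : (pvSL l == "stop" && pvAC 0 ((k : Int) + 1) rest) = true
      · rw [hc]
        simp only [Bool.not_true, Bool.false_eq_true, if_false]
        rw [hih, pvGo, if_pos hc]
      · simp only [Bool.not_eq_true] at hc
        rw [hc]
        simp only [Bool.not_false, if_true]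
        rw [List.map_cons, hih, pvGo, if_neg (by simp [hc])]

theorem pvAlt_eq (lines : List String) :
    remove_redundant_final_stop_alt lines = pvGo 0 0 lines := by
  have := pvAlt_aux lines lines 0 (by simp)
  simpa [remove_redundant_final_stop_alt] using this

-- ===== VERDICT (by name: the statement is the Claim_ definition above) =====
theorem remove_redundant_final_stop_spec : Claim_equal_remove_redundant_final_stop := by
  intro lines _
  unfold Spec_remove_redundant_final_stop
  rw [pvAlt_eq]
  unfold remove_redundant_final_stop
  exact pvMain lines 0 le_rfl
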